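-- pv_equiv track=rewrite | github.com/jhl-labs/sepilot-cli | sepilot/ui/interactive.py | _parse_prompt_history_entries
-- ===== SOURCE A (Python) =====
-- def _parse_prompt_history_entries(raw: str) -> list[str]:
--     """Parse prompt_toolkit history file content into entries."""
--     entries: list[str] = []
--     current_lines: list[str] = []
--
--     for line in raw.splitlines():
--         if line.startswith("+"):
--             current_lines.append(line[1:])
--             continue
--
--         if line.startswith("#"):
--             continue
--
--         if not line.strip():
--             if current_lines:
--                 entries.append("\n".join(current_lines).strip())
--                 current_lines = []
--             continue
--
--         if current_lines:
--             entries.append("\n".join(current_lines).strip())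
--             current_lines = []
--         entries.append(line.strip())
--
--     if current_lines:
--         entries.append("\n".join(current_lines).strip())
--
--     return [entry for entry in entries if entry]
-- ===== SOURCE B (Python) =====
-- def _parse_prompt_history_entries(raw: str) -> list[str]:
--     """Parse prompt_toolkit history file content into entries (run-scan over comment-free lines)."""
--     lines = [l for l in raw.splitlines() if not l.startswith("#")]
--     entries: list[str] = []
--     i, n = 0, len(lines)
--     while i < n:
--         if lines[i].startswith("+"):
--             j = i
--             while j < n and lines[j].startswith("+"):
--                 j += 1
--             entries.append("\n".join(l[1:] for l in lines[i:j]).strip())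
--             i = j
--         else:
--             entries.append(lines[i].strip())
--             i += 1
--     return [e for e in entries if e]
-- ===== Notes on version B (the rewrite author's own statement) =====
-- stated objective: simpler
-- what changed: Replaced A's running-buffer/flush state machine (entries plus current_lines mutated per line) with a two-phase decomposition: first drop all comment lines, then scan the remaining lines by maximal runs of continuation lines, emitting one joined entry per run and one stripped entry per other line, filtering empties at the end.
import Mathlib
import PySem

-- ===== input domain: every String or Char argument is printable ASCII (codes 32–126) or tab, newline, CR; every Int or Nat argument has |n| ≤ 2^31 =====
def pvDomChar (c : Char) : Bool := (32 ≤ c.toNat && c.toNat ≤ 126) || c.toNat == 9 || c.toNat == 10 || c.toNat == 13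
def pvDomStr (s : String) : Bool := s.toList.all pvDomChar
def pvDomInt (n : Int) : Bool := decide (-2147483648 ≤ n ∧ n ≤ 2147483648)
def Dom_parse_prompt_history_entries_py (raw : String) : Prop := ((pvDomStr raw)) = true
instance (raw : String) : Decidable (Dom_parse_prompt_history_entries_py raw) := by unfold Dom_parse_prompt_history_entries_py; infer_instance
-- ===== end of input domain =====

-- B replaces A's running-buffer/flush state machine by a comment filter followed by a run-scan
-- over maximal '+'-runs (objective: simpler decomposition, same single-pass cost).

-- ===== PORT A =====
-- "\n".join(cs).strip()  (shared helper: both Pythons compute this exact expression)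
def pvJoinStrip (cs : List String) : String := PySem.Str.strip (PySem.Str.join "\n" cs)

-- one iteration of A's for-loop over (entries, current_lines)
def pvStepA (st : List String × List String) (line : String) : List String × List String :=
  if PySem.Str.startswith line "+" then
    (st.1, st.2 ++ [PySem.Str.slice line (some 1) none])
  else if PySem.Str.startswith line "#" then
    st
  else if PySem.Str.strip line = "" then
    (if st.2 ≠ [] then st.1 ++ [pvJoinStrip st.2] else st.1, [])
  else
    ((if st.2 ≠ [] then st.1 ++ [pvJoinStrip st.2] else st.1) ++ [PySem.Str.strip line], [])

-- A's trailing flush of current_lines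
def pvFinalA (st : List String × List String) : List String :=
  if st.2 ≠ [] then st.1 ++ [pvJoinStrip st.2] else st.1

def parse_prompt_history_entries_py (raw : String) : List String :=
  (pvFinalA ((PySem.Str.splitlines raw).foldl pvStepA ([], []))).filter (fun e => e != "")

-- ===== PORT B =====
-- Source B's while-loop: scan maximal runs of '+' lines (inner while j = takeWhile/dropWhile)
def pvRunScan : List String → List String
  | [] => []
  | l :: rest =>
    if PySem.Str.startswith l "+" then
      pvJoinStrip ((l :: rest.takeWhile (fun x => PySem.Str.startswith x "+")).map
          (fun x => PySem.Str.slice x (some 1) none)) ::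
        pvRunScan (rest.dropWhile (fun x => PySem.Str.startswith x "+"))
    else
      PySem.Str.strip l :: pvRunScan rest
  termination_by ls => ls.length
  decreasing_by
  · exact Nat.lt_succ_of_le (List.length_dropWhile_le _ _)
  · simp

def parse_prompt_history_entries_py_alt (raw : String) : List String :=
  (pvRunScan ((PySem.Str.splitlines raw).filter
      (fun l => !PySem.Str.startswith l "#"))).filter (fun e => e != "")

-- ===== PRECONDITION & SPEC =====
def Spec_parse_prompt_history_entries_py (raw : String) (out : List String) : Prop := out = parse_prompt_history_entries_py_alt raw
instance (raw : String) (out : List String) : Decidable (Spec_parse_prompt_history_entries_py raw out) := by unfold Spec_parse_prompt_history_entries_py; infer_instance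

-- ===== CLAIM (what is proved, stated in full; the proofs are below) =====
def Claim_equal_parse_prompt_history_entries_py : Prop := ∀ (raw : String), Dom_parse_prompt_history_entries_py raw → Spec_parse_prompt_history_entries_py raw (parse_prompt_history_entries_py raw)

-- ===== LEMMAS AND PROOFS =====

-- proof-side abbreviations
def pvFlush (c : List String) : List String := if c ≠ [] then [pvJoinStrip c] else []

-- A's loop, re-expressed recursively over the remaining lines with pending buffer c
def pvFA : List String → List String → List String
  | [], c => pvFlush c
  | l :: ls, c =>
    if PySem.Str.startswith l "+" then pvFA ls (c ++ [PySem.Str.slice l (some 1) none])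
    else if PySem.Str.startswith l "#" then pvFA ls c
    else if PySem.Str.strip l = "" then pvFlush c ++ pvFA ls []
    else pvFlush c ++ PySem.Str.strip l :: pvFA ls []

-- re-attach the '+' marker to a buffered body
def pvPlus (s : String) : String := String.ofList ('+' :: s.toList)

theorem pvFlush_eq (e c : List String) :
    (if c ≠ [] then e ++ [pvJoinStrip c] else e) = e ++ pvFlush c := by
  cases c <;> simp [pvFlush]

theorem pvFoldA (ls : List String) : ∀ e c : List String,
    pvFinalA (ls.foldl pvStepA (e, c)) = e ++ pvFA ls c := by
  induction ls with
  | nil => intro e c; cases c <;> simp [pvFinalA, pvFA, pvFlush]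
  | cons l ls ih =>
    intro e c
    simp only [List.foldl_cons]
    rw [pvFA]
    simp only [pvStepA, pvFlush_eq]
    split_ifs with h1 h2 h3
    · exact ih e (c ++ [PySem.Str.slice l (some 1) none])
    · exact ih e c
    · rw [ih, List.append_assoc]
    · rw [ih]; simp [List.append_assoc]

theorem pvHash_not_plus (l : String) (h : PySem.Str.startswith l "#" = true) :
    PySem.Str.startswith l "+" = false := by
  rw [PySem.Str.startswith_eq, PySem.Chars.startswith_iff] at h
  rw [PySem.Str.startswith_eq, Bool.eq_false_iff]
  intro hp
  rw [PySem.Chars.startswith_iff] at hp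
  rcases h with ⟨u, hu⟩
  rcases hp with ⟨v, hv⟩
  rw [show ("#" : String).toList = ['#'] from rfl] at hu
  rw [show ("+" : String).toList = ['+'] from rfl] at hv
  rw [← hu] at hv
  simp at hv

theorem pvFA_filterHash (ls : List String) : ∀ c : List String,
    pvFA (ls.filter (fun l => !PySem.Str.startswith l "#")) c = pvFA ls c := by
  induction ls with
  | nil => intro c; rfl
  | cons l ls ih =>
    intro c
    by_cases hh : PySem.Str.startswith l "#" = true
    · rw [List.filter_cons_of_neg (by simp only [hh, Bool.not_true]; exact Bool.false_ne_true), ih]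
      conv_rhs => rw [pvFA]
      rw [pvHash_not_plus l hh, hh]
      simp
    · have hf : PySem.Str.startswith l "#" = false := by simpa using hh
      rw [List.filter_cons_of_pos (by simp only [hf, Bool.not_false]), pvFA, pvFA]
      split_ifs <;> rw [ih]

theorem pvPlus_startswith (s : String) :
    PySem.Str.startswith (pvPlus s) "+" = true := by
  simp [pvPlus, PySem.Str.startswith_eq, PySem.Chars.startswith_iff]

theorem pvDrop1_plus (s : String) :
    PySem.Str.slice (pvPlus s) (some 1) none = s := by
  apply String.toList_inj.mp
  simp [pvPlus, PySem.Str.toList_slice, PySem.Chars.slice_eq_listSlice,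
    PySem.List.slice_from_one, String.toList_ofList]

theorem pvPlus_drop1 (l : String) (h : PySem.Str.startswith l "+" = true) :
    pvPlus (PySem.Str.slice l (some 1) none) = l := by
  apply String.toList_inj.mp
  rw [PySem.Str.startswith_eq, PySem.Chars.startswith_iff] at h
  rcases h with ⟨u, hu⟩
  rw [show ("+" : String).toList = ['+'] from rfl] at hu
  simp [pvPlus, PySem.Str.toList_slice, PySem.Chars.slice_eq_listSlice,
    PySem.List.slice_from_one, String.toList_ofList, ← hu]

theorem pvRunScan_nil : pvRunScan [] = [] := by rw [pvRunScan]

theorem pvRunScan_flush (c : List String) (rest : List String)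
    (hr : rest.takeWhile (fun x => PySem.Str.startswith x "+") = []) :
    pvRunScan (c.map pvPlus ++ rest) = pvFlush c ++ pvRunScan rest := by
  cases c with
  | nil => simp [pvFlush]
  | cons x c' =>
    have hall : ∀ y ∈ c'.map pvPlus, (fun x => PySem.Str.startswith x "+") y = true := by
      intro y hy
      rcases List.mem_map.mp hy with ⟨z, _, rfl⟩
      exact pvPlus_startswith z
    rw [List.map_cons, List.cons_append, pvRunScan, if_pos (pvPlus_startswith x)]
    have ht : ((c'.map pvPlus ++ rest).takeWhile (fun x => PySem.Str.startswith x "+"))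
        = c'.map pvPlus := by
      rw [List.takeWhile_append_of_pos hall, hr, List.append_nil]
    have hd : ((c'.map pvPlus ++ rest).dropWhile (fun x => PySem.Str.startswith x "+"))
        = rest := by
      rw [List.dropWhile_append_of_pos hall]
      cases hrest : rest with
      | nil => rfl
      | cons r rs =>
        rw [hrest] at hr
        rw [List.dropWhile_cons]
        rw [List.takeWhile_cons] at hr
        split_ifs with hp1
        · rw [if_pos hp1] at hr; simp at hr
        · rfl
    rw [ht, hd]
    have hmap : List.map (fun x => PySem.Str.slice x (some 1) none) (List.map pvPlus c')
        = c' := by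
      simp [List.map_map, Function.comp_def, pvDrop1_plus]
    simp [pvFlush, List.map_cons, hmap, pvDrop1_plus]

theorem pvFA_eq_run (ls : List String)
    (hh : ∀ l ∈ ls, PySem.Str.startswith l "#" = false) : ∀ c : List String,
    (pvFA ls c).filter (fun e => e != "")
      = (pvRunScan (c.map pvPlus ++ ls)).filter (fun e => e != "") := by
  induction ls with
  | nil =>
    intro c
    rw [pvRunScan_flush c [] rfl, pvRunScan_nil, List.append_nil]
    rfl
  | cons l ls ih =>
    intro c
    have hh' : ∀ x ∈ ls, PySem.Str.startswith x "#" = false := by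
      intro x hx; exact hh x (List.mem_cons_of_mem _ hx)
    by_cases hp : PySem.Str.startswith l "+" = true
    · rw [pvFA, if_pos hp, ih hh' (c ++ [PySem.Str.slice l (some 1) none]),
        List.map_append, List.map_singleton, pvPlus_drop1 l hp, List.append_assoc,
        List.singleton_append]
    · have hrs : pvRunScan (c.map pvPlus ++ l :: ls) = pvFlush c ++ pvRunScan (l :: ls) := by
        apply pvRunScan_flush
        rw [List.takeWhile_cons, if_neg hp]
      have hcons : pvRunScan (l :: ls) = PySem.Str.strip l :: pvRunScan ls := by
        rw [pvRunScan, if_neg hp]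
      have hf : PySem.Str.startswith l "#" = false := hh l List.mem_cons_self
      rw [hrs, hcons, pvFA, if_neg hp, if_neg (by rw [hf]; exact Bool.false_ne_true)]
      have ihe := ih hh' []
      simp only [List.map_nil, List.nil_append] at ihe
      by_cases hb : PySem.Str.strip l = ""
      · rw [if_pos hb]
        simp only [List.filter_append, ihe, List.filter_cons, hb]
        simp
      · rw [if_neg hb]
        simp only [List.filter_append, List.filter_cons, ihe]

-- ===== VERDICT (by name: the statement is the Claim_ definition above) =====
theorem parse_prompt_history_entries_py_spec : Claim_equal_parse_prompt_history_entries_py := by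
  intro raw _
  unfold Spec_parse_prompt_history_entries_py parse_prompt_history_entries_py
    parse_prompt_history_entries_py_alt
  rw [pvFoldA, List.nil_append,
      ← pvFA_filterHash (PySem.Str.splitlines raw) []]
  have hh : ∀ l ∈ (PySem.Str.splitlines raw).filter (fun l => !PySem.Str.startswith l "#"),
      PySem.Str.startswith l "#" = false := by
    intro l hl
    have := (List.mem_filter.mp hl).2
    simpa using this
  have hmain := pvFA_eq_run _ hh []
  simpa using hmain
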